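-- pv_equiv track=rewrite | github.com/wangyendt/LeetCode | Contests/300-400/week 332/2565. Subsequence With the Minimum Score/Subsequence With the Minimum Score.py | minimumScore
-- ===== SOURCE A (Python) =====
-- def minimumScore(s: str, t: str) -> int:
--     suffix = [-1] * len(s)
--     j = len(t) - 1
--     for i in range(len(s) - 1, -1, -1):
--         if 0 <= j and s[i] == t[j]:
--             j -= 1
--         suffix[i] = j
--     ret = j + 1
--     j = 0
--     for i in range(len(s)):
--         ret = min(ret, max(0, suffix[i] - j + 1))
--         if j < len(t) and s[i] == t[j]:
--             j += 1
--     return min(ret, len(t) - j)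
-- ===== SOURCE B (Python) =====
-- def minimumScore(s: str, t: str) -> int:
--     # Binary search on the answer k: is some contiguous window of length k
--     # removable from t so that the rest is a subsequence of s?
--     m = len(t)
--
--     def fits(u):
--         it = iter(s)
--         return all(c in it for c in u)
--
--     lo, hi = 0, m  # removing all of t (k = m) always works
--     while lo < hi:
--         k = (lo + hi) // 2
--         if any(fits(t[:i] + t[i + k:]) for i in range(m - k + 1)):
--             hi = k
--         else:
--             lo = k + 1
--     return lo
-- ===== Notes on version B (the rewrite author's own statement) =====
-- stated objective: alternative
-- what changed: Replaces A's two greedy pointer sweeps over s (suffix index array plus interleaved forward min) with a binary search on the answer k, deciding each k by brute-force subsequence tests of t with each length-k window removed.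
import Mathlib
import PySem

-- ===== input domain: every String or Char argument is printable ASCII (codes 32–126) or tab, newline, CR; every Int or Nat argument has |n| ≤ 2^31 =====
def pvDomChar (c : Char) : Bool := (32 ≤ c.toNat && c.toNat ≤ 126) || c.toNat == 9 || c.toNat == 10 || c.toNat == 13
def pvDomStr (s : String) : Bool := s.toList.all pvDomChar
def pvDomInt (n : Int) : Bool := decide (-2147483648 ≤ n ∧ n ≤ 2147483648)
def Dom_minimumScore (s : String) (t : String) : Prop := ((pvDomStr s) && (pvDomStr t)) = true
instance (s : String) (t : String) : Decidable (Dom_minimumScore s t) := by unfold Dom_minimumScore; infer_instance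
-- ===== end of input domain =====

-- B replaces A's single-pass greedy-pointer scan over s by a binary search on the answer k,
-- each step deciding feasibility by brute subsequence tests of t with a window of length k
-- removed; objective: alternative (a genuinely different, search-based algorithm).

-- ===== PORT A =====
-- one iteration of A's backward loop body: if 0 <= j and s[i] == t[j]: j -= 1; suffix[i] = j
def pvABack (ct : List Char) (c : Char) (st : List Int × Int) : List Int × Int :=
  (if 0 ≤ st.2 ∧ some c = PySem.List.pyGet? ct st.2 then (st.2 - 1) :: st.1 else st.2 :: st.1,
   if 0 ≤ st.2 ∧ some c = PySem.List.pyGet? ct st.2 then st.2 - 1 else st.2)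

-- the backward loop (s[i] with descending i is rendered as a foldr over s's characters; each
-- suffix cell is written exactly once, in descending index order, so consing builds the array)
def pvASuffix (ct : List Char) (cs : List Char) : List Int × Int :=
  cs.foldr (pvABack ct) ([], (ct.length : Int) - 1)

-- one iteration of A's forward loop (state = (ret, j), input = (s[i], suffix[i]))
def pvAStep (ct : List Char) (st : Int × Int) (p : Char × Int) : Int × Int :=
  (min st.1 (max 0 (p.2 - st.2 + 1)),
   if st.2 < (ct.length : Int) ∧ some p.1 = PySem.List.pyGet? ct st.2 then st.2 + 1 else st.2)

-- the forward loop over i in range(len(s)), reading s[i] and suffix[i]: folded over their zip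
def pvAFwd (ct : List Char) (pairs : List (Char × Int)) (ret j : Int) : Int × Int :=
  pairs.foldl (pvAStep ct) (ret, j)

def minimumScore (s : String) (t : String) : Int :=
  let cs := s.toList
  let ct := t.toList
  let bk := pvASuffix ct cs
  let fw := pvAFwd ct (cs.zip bk.1) (bk.2 + 1) 0
  min fw.1 ((ct.length : Int) - fw.2)

-- ===== PORT B =====
-- B's helper fits(u): scan s once, consuming a matching char for each char of u in order
-- (the semantics of `it = iter(s); all(c in it for c in u)`)
def pvIsSub : List Char → List Char → Bool
  | [], _ => true
  | _ :: _, [] => false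
  | c :: u, x :: xs => if c = x then pvIsSub u xs else pvIsSub (c :: u) xs

-- B's `any(fits(t[:i] + t[i+k:]) for i in range(m - k + 1))` (all indices are nonnegative
-- Nats here, so take/drop are exact for the slices t[:i] and t[i+k:])
def pvFeasible (ct cs : List Char) (k : Nat) : Bool :=
  (List.range (ct.length - k + 1)).any (fun i => pvIsSub (ct.take i ++ ct.drop (i + k)) cs)

-- B's while-loop binary search on the answer, lo/hi/k as in Source B
-- ((lo+hi)//2 on nonnegative ints = Nat division here, exact)
def pvBSearch (P : Nat → Bool) (lo hi : Nat) : Nat :=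
  if h : lo < hi then
    if P ((lo + hi) / 2) then pvBSearch P lo ((lo + hi) / 2)
    else pvBSearch P ((lo + hi) / 2 + 1) hi
  else lo
termination_by hi - lo
decreasing_by
  · omega
  · omega

def minimumScore_alt (s : String) (t : String) : Int :=
  let cs := s.toList
  let ct := t.toList
  (pvBSearch (pvFeasible ct cs) 0 ct.length : Int)

-- ===== PRECONDITION & SPEC =====
def Spec_minimumScore (s : String) (t : String) (out : Int) : Prop := out = minimumScore_alt s t
instance (s : String) (t : String) (out : Int) : Decidable (Spec_minimumScore s t out) := by unfold Spec_minimumScore; infer_instance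

-- ===== CLAIM (what is proved, stated in full; the proofs are below) =====
def Claim_equal_minimumScore : Prop := ∀ (s : String) (t : String), Dom_minimumScore s t → Spec_minimumScore s t (minimumScore s t)

-- ===== LEMMAS AND PROOFS =====

-- shared forward-pointer step
def pvF (ct : List Char) (j : Int) (c : Char) : Int :=
  if j < (ct.length : Int) ∧ PySem.List.pyGet? ct j = some c then j + 1 else j

-- backward match count of t's suffix in cs (Int, mirroring A's suffix pointer)
def pvBq (ct : List Char) : List Char → Int
  | [] => 0
  | c :: cs =>
    if pvBq ct cs < (ct.length : Int) ∧
        PySem.List.pyGet? ct ((ct.length : Int) - 1 - pvBq ct cs) = some c then pvBq ct cs + 1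
    else pvBq ct cs

-- the list of per-cut values, threading the forward pointer j
def pvVals (ct : List Char) : List Char → Int → List Int
  | [], j => [max 0 ((ct.length : Int) - j)]
  | c :: cs, j => max 0 ((ct.length : Int) - j - pvBq ct (c :: cs)) :: pvVals ct cs (pvF ct j c)

-- running minimum of a nonempty list
def pvLMin : List Int → Int
  | [] => 0
  | x :: xs => xs.foldl min x

lemma pvBq_nonneg (ct cs : List Char) : 0 ≤ pvBq ct cs := by
  induction cs with
  | nil => simp [pvBq]
  | cons c cs ih => simp only [pvBq]; split <;> omega

lemma pvBq_le (ct cs : List Char) : pvBq ct cs ≤ (ct.length : Int) := by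
  induction cs with
  | nil => simp [pvBq]
  | cons c cs ih => simp only [pvBq]; split <;> omega

lemma pvF_le (ct : List Char) (j : Int) (c : Char) (h : j ≤ (ct.length : Int)) :
    pvF ct j c ≤ (ct.length : Int) := by
  unfold pvF; split <;> omega

-- A's backward loop computes (map (m-1-·) over the tails' match counts, m-1-bq cs)
lemma pvASuffix_eq (ct cs : List Char) :
    pvASuffix ct cs =
      ((cs.tails.dropLast).map (fun l => (ct.length : Int) - 1 - pvBq ct l),
        (ct.length : Int) - 1 - pvBq ct cs) := by
  induction cs with
  | nil => simp [pvASuffix, pvBq]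
  | cons c cs ih =>
    have hb := pvBq_nonneg ct cs
    have hdrop : ((c :: cs) :: cs.tails).dropLast = (c :: cs) :: cs.tails.dropLast :=
      List.dropLast_cons_of_ne_nil (by cases cs <;> simp)
    simp only [pvASuffix, List.foldr_cons] at *
    rw [ih]
    simp only [List.tails_cons]
    rw [hdrop]
    simp only [List.map_cons, pvABack]
    by_cases h : pvBq ct cs < (ct.length : Int) ∧
        PySem.List.pyGet? ct ((ct.length : Int) - 1 - pvBq ct cs) = some c
    · rw [if_pos ⟨by omega, h.2.symm⟩, if_pos ⟨by omega, h.2.symm⟩]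
      have hq : pvBq ct (c :: cs) = pvBq ct cs + 1 := by rw [pvBq, if_pos h]
      rw [hq]
      simp only [Prod.mk.injEq, List.cons.injEq]
      exact ⟨⟨by omega, trivial⟩, by omega⟩
    · have h' : ¬ (0 ≤ (ct.length : Int) - 1 - pvBq ct cs ∧
          some c = PySem.List.pyGet? ct ((ct.length : Int) - 1 - pvBq ct cs)) := by
        rintro ⟨h1, h2⟩; exact h ⟨by omega, h2.symm⟩
      have hq : pvBq ct (c :: cs) = pvBq ct cs := by rw [pvBq, if_neg h]
      rw [if_neg h', if_neg h', hq]

lemma pvFoldlMin (ys : List Int) (a b : Int) :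
    ys.foldl min (min a b) = min a (ys.foldl min b) := by
  induction ys generalizing b with
  | nil => rfl
  | cons z zs ih => simp only [List.foldl_cons, min_assoc]; exact ih (min b z)

lemma pvLMin_cons (x : Int) (xs : List Int) (hx : xs ≠ []) :
    pvLMin (x :: xs) = min x (pvLMin xs) := by
  cases xs with
  | nil => simp at hx
  | cons y ys => simp only [pvLMin, List.foldl_cons]; exact pvFoldlMin ys x y

lemma pvVals_ne_nil (ct cs : List Char) (j : Int) : pvVals ct cs j ≠ [] := by
  cases cs <;> simp [pvVals]

lemma pvLMin_le_head (x : Int) (xs : List Int) : pvLMin (x :: xs) ≤ x := by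
  cases xs with
  | nil => simp [pvLMin]
  | cons y ys => rw [pvLMin_cons x (y :: ys) (by simp)]; omega

lemma pvLMin_le_mem (xs : List Int) (x : Int) (hx : x ∈ xs) : pvLMin xs ≤ x := by
  induction xs with
  | nil => simp at hx
  | cons y ys ih =>
    rcases List.mem_cons.mp hx with rfl | hx'
    · exact pvLMin_le_head x ys
    · have hys : ys ≠ [] := List.ne_nil_of_mem hx'
      rw [pvLMin_cons y ys hys]
      exact le_trans (min_le_right _ _) (ih hx')

lemma pvLMin_mem (xs : List Int) (hx : xs ≠ []) : pvLMin xs ∈ xs := by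
  induction xs with
  | nil => simp at hx
  | cons y ys ih =>
    cases hys : ys with
    | nil => subst hys; simp [pvLMin]
    | cons z zs =>
      rw [← hys, pvLMin_cons y ys (by simp [hys])]
      rcases le_total y (pvLMin ys) with h | h
      · rw [min_eq_left h]; exact List.mem_cons_self
      · rw [min_eq_right h]; exact List.mem_cons_of_mem _ (ih (by simp [hys]))

lemma pvAStep_eq (ct : List Char) (r j : Int) (c : Char) (v : Int) :
    pvAStep ct (r, j) (c, v) = (min r (max 0 (v - j + 1)), pvF ct j c) := by
  simp only [pvAStep, pvF]
  congr 1
  simp [eq_comm]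

-- the main correspondence: A's forward loop + final term = min of initial ret and pvVals
lemma pvAFwd_eq (ct : List Char) (cs : List Char) (ret j : Int) (hj : j ≤ (ct.length : Int)) :
    min (pvAFwd ct (cs.zip ((cs.tails.dropLast).map (fun l => (ct.length : Int) - 1 - pvBq ct l))) ret j).1
      ((ct.length : Int) -
        (pvAFwd ct (cs.zip ((cs.tails.dropLast).map (fun l => (ct.length : Int) - 1 - pvBq ct l))) ret j).2)
    = min ret (pvLMin (pvVals ct cs j)) := by
  induction cs generalizing ret j with
  | nil =>
    simp only [pvAFwd, pvVals, pvLMin, List.zip_nil_left, List.foldl_nil]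
    omega
  | cons c cs ih =>
    have hstep : pvF ct j c ≤ (ct.length : Int) := pvF_le ct j c hj
    have hdrop : ((c :: cs) :: cs.tails).dropLast = (c :: cs) :: cs.tails.dropLast :=
      List.dropLast_cons_of_ne_nil (by cases cs <;> simp)
    simp only [List.tails_cons]
    rw [hdrop]
    simp only [List.map_cons, List.zip_cons_cons]
    have hfold : ∀ r0 j0, pvAFwd ct ((c, (ct.length : Int) - 1 - pvBq ct (c :: cs)) ::
        cs.zip ((cs.tails.dropLast).map (fun l => (ct.length : Int) - 1 - pvBq ct l))) r0 j0 =
        pvAFwd ct (cs.zip ((cs.tails.dropLast).map (fun l => (ct.length : Int) - 1 - pvBq ct l)))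
          (min r0 (max 0 ((ct.length : Int) - 1 - pvBq ct (c :: cs) - j0 + 1))) (pvF ct j0 c) := by
      intro r0 j0
      simp only [pvAFwd, List.foldl_cons, pvAStep_eq]
    rw [hfold, ih _ _ hstep]
    rw [show pvVals ct (c :: cs) j =
      max 0 ((ct.length : Int) - j - pvBq ct (c :: cs)) :: pvVals ct cs (pvF ct j c) from rfl]
    rw [pvLMin_cons _ _ (pvVals_ne_nil ct cs (pvF ct j c))]
    generalize pvLMin (pvVals ct cs (pvF ct j c)) = L
    generalize pvBq ct (c :: cs) = q
    omega

-- A's value is the minimum of the per-cut values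
lemma pvA_eq (s t : String) : minimumScore s t = pvLMin (pvVals t.toList s.toList 0) := by
  unfold minimumScore
  simp only []
  rw [pvASuffix_eq]
  have hA := pvAFwd_eq (t.toList) (s.toList)
    (((t.toList).length : Int) - 1 - pvBq (t.toList) (s.toList) + 1) 0 (by positivity)
  rw [hA]
  have hq := pvBq_nonneg (t.toList) (s.toList)
  have hq' := pvBq_le (t.toList) (s.toList)
  obtain ⟨tl, htl⟩ : ∃ tl, pvVals (t.toList) (s.toList) 0 =
      max 0 (((t.toList).length : Int) - 0 - pvBq (t.toList) (s.toList)) :: tl := by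
    cases hcs : s.toList with
    | nil => exact ⟨[], by simp [pvVals, pvBq]⟩
    | cons c cs' => exact ⟨_, rfl⟩
  have hle : pvLMin (pvVals (t.toList) (s.toList) 0) ≤
      max 0 (((t.toList).length : Int) - 0 - pvBq (t.toList) (s.toList)) := by
    rw [htl]; exact pvLMin_le_head _ _
  omega

-- ===== Nat-level greedy counts and their extremal properties =====

-- forward greedy: length of the longest prefix of ts embeddable in cs, matched left to right
def pvG : List Char → List Char → Nat
  | _, [] => 0
  | [], _ :: _ => 0
  | a :: ts, c :: cs => if a = c then pvG ts cs + 1 else pvG (a :: ts) cs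

-- backward greedy: length of the longest suffix of ts embeddable in cs, matched right to left
def pvGB (ts : List Char) : List Char → Nat
  | [] => 0
  | c :: cs =>
    if pvGB ts cs < ts.length ∧ ts[ts.length - 1 - pvGB ts cs]? = some c then pvGB ts cs + 1
    else pvGB ts cs

lemma pvG_nil (cs : List Char) : pvG [] cs = 0 := by cases cs <;> simp [pvG]

lemma pvG_nil' (ts : List Char) : pvG ts [] = 0 := by cases ts <;> simp [pvG]

lemma pvG_le (cs ts : List Char) : pvG ts cs ≤ ts.length := by
  induction cs generalizing ts with
  | nil => simp [pvG]
  | cons c cs ih =>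
    cases ts with
    | nil => simp [pvG_nil]
    | cons a ts' =>
      simp only [pvG]
      split
      · have := ih ts'; simp; omega
      · have := ih (a :: ts'); simpa using this

lemma pvG_sound (cs ts : List Char) : (ts.take (pvG ts cs)).Sublist cs := by
  induction cs generalizing ts with
  | nil => simp [pvG]
  | cons c cs ih =>
    cases ts with
    | nil => simp [pvG_nil]
    | cons a ts' =>
      simp only [pvG]
      split
      · rename_i h
        subst h
        rw [List.take_succ_cons]
        exact (ih ts').cons₂ a
      · exact (ih (a :: ts')).cons c

lemma pvG_drop (cs : List Char) (a : Char) (ts : List Char) :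
    pvG (a :: ts) cs ≤ pvG ts cs + 1 := by
  induction cs generalizing a ts with
  | nil => simp [pvG]
  | cons c cs ih =>
    cases ts with
    | nil =>
      rw [pvG_nil]
      have h0 := pvG_le (c :: cs) [a]
      simpa using h0
    | cons b ts' =>
      simp only [pvG]
      by_cases hac : a = c
      · rw [if_pos hac]
        by_cases hbc : b = c
        · rw [if_pos hbc]; have := ih b ts'; omega
        · rw [if_neg hbc]
      · rw [if_neg hac]
        by_cases hbc : b = c
        · rw [if_pos hbc]
          have h1 := ih a (b :: ts')
          have h2 := ih b ts'
          omega
        · rw [if_neg hbc]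
          exact ih a (b :: ts')

lemma pvG_mono_cons (cs : List Char) (c : Char) (ts : List Char) :
    pvG ts cs ≤ pvG ts (c :: cs) := by
  cases ts with
  | nil => simp [pvG_nil]
  | cons b ts' =>
    simp only [pvG]
    by_cases hbc : b = c
    · rw [if_pos hbc]; have := pvG_drop cs b ts'; omega
    · rw [if_neg hbc]

lemma pvG_max (cs ts : List Char) (i : Nat) (hi : i ≤ ts.length)
    (h : (ts.take i).Sublist cs) : i ≤ pvG ts cs := by
  induction cs generalizing ts i with
  | nil =>
    rw [List.sublist_nil, List.take_eq_nil_iff] at h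
    rcases h with h | h
    · omega
    · subst h; simp only [List.length_nil] at hi; omega
  | cons c cs ih =>
    cases i with
    | zero => omega
    | succ i' =>
      cases ts with
      | nil => simp at hi
      | cons a ts' =>
        rw [List.take_succ_cons] at h
        rcases List.sublist_cons_iff.mp h with h' | ⟨r, hr, h'⟩
        · have := ih (a :: ts') (i' + 1) hi (by rw [List.take_succ_cons]; exact h')
          exact le_trans this (pvG_mono_cons cs c (a :: ts'))
        · obtain ⟨hac, hrest⟩ := List.cons.inj hr
          have hstep : pvG (a :: ts') (c :: cs) = pvG ts' cs + 1 := by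
            simp only [pvG, if_pos hac]
          rw [hstep]
          have := ih ts' i' (by simp only [List.length_cons] at hi; omega)
            (by rw [hrest]; exact h')
          omega

lemma pvGB_sound (ts cs : List Char) : (ts.drop (ts.length - pvGB ts cs)).Sublist cs := by
  induction cs with
  | nil => simp [pvGB]
  | cons c cs ih =>
    simp only [pvGB]
    split
    · rename_i h
      obtain ⟨h1, h2⟩ := h
      have hidx : ts.length - (pvGB ts cs + 1) = ts.length - 1 - pvGB ts cs := by omega
      rw [hidx]
      have hlt : ts.length - 1 - pvGB ts cs < ts.length := by omega
      rw [List.drop_eq_getElem_cons hlt]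
      have hgot : ts[ts.length - 1 - pvGB ts cs] = c := by
        rw [List.getElem?_eq_getElem hlt] at h2
        simpa using h2
      rw [hgot]
      have harith : ts.length - 1 - pvGB ts cs + 1 = ts.length - pvGB ts cs := by omega
      rw [harith]
      exact ih.cons₂ c
    · exact ih.cons c

lemma pvGB_max (ts cs : List Char) (q : Nat) (hq : q ≤ ts.length)
    (h : (ts.drop (ts.length - q)).Sublist cs) : q ≤ pvGB ts cs := by
  induction cs generalizing q with
  | nil =>
    rw [List.sublist_nil] at h
    have := congrArg List.length h
    simp at this
    simp [pvGB]; omega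
  | cons c cs ih =>
    cases Nat.eq_zero_or_pos q with
    | inl h0 => omega
    | inr hpos =>
      have hlt : ts.length - q < ts.length := by omega
      rw [List.drop_eq_getElem_cons hlt] at h
      have hmono : pvGB ts cs ≤ pvGB ts (c :: cs) := by
        simp only [pvGB]; split <;> omega
      rcases List.sublist_cons_iff.mp h with h' | ⟨r, hr, h'⟩
      · have := ih q hq (by rw [List.drop_eq_getElem_cons hlt]; exact h')
        omega
      · obtain ⟨hhead, hrest⟩ := List.cons.inj hr
        have hih := ih (q - 1) (by omega)
          (by rw [show ts.length - (q - 1) = ts.length - q + 1 from by omega, hrest]; exact h')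
        by_cases hqq : q ≤ pvGB ts cs
        · omega
        · have hq1 : q = pvGB ts cs + 1 := by omega
          simp only [pvGB]
          rw [if_pos ⟨by omega, by
            rw [show ts.length - 1 - pvGB ts cs = ts.length - q from by omega,
              List.getElem?_eq_getElem hlt, hhead]⟩]
          omega

-- ===== bridges between A's Int-threaded loop values and the Nat greedy counts =====

lemma pvBq_eq (ct cs : List Char) : pvBq ct cs = (pvGB ct cs : Int) := by
  induction cs with
  | nil => simp [pvBq, pvGB]
  | cons c cs ih =>
    simp only [pvBq, pvGB, ih]
    by_cases hq : pvGB ct cs < ct.length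
    · have hcast : (ct.length : Int) - 1 - (pvGB ct cs : Int) = ((ct.length - 1 - pvGB ct cs : Nat) : Int) := by
        omega
      rw [hcast, PySem.List.pyGet?_natCast]
      by_cases h2 : ct[ct.length - 1 - pvGB ct cs]? = some c
      · rw [if_pos ⟨by exact_mod_cast hq, h2⟩, if_pos ⟨hq, h2⟩]; push_cast; ring
      · rw [if_neg (by rintro ⟨_, hx⟩; exact h2 hx), if_neg (by rintro ⟨_, hx⟩; exact h2 hx)]
    · rw [if_neg (by rintro ⟨hx, _⟩; exact hq (by exact_mod_cast hx)),
        if_neg (by rintro ⟨hx, _⟩; exact hq hx)]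

-- Nat form of A's forward pointer step
def pvFN (ct : List Char) (jn : Nat) (c : Char) : Nat :=
  if jn < ct.length ∧ ct[jn]? = some c then jn + 1 else jn

lemma pvF_natCast (ct : List Char) (jn : Nat) (c : Char) :
    pvF ct (jn : Int) c = (pvFN ct jn c : Int) := by
  unfold pvF pvFN
  rw [PySem.List.pyGet?_natCast]
  by_cases h : jn < ct.length ∧ ct[jn]? = some c
  · rw [if_pos ⟨by exact_mod_cast h.1, h.2⟩, if_pos h]; push_cast; ring
  · rw [if_neg (by rintro ⟨h1, h2⟩; exact h ⟨by exact_mod_cast h1, h2⟩), if_neg h]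

lemma pvG_shift (ct : List Char) (jn : Nat) (c : Char) (X : List Char) :
    jn + pvG (ct.drop jn) (c :: X) = pvFN ct jn c + pvG (ct.drop (pvFN ct jn c)) X := by
  by_cases hj : jn < ct.length
  · have hd : ct.drop jn = ct[jn] :: ct.drop (jn + 1) := List.drop_eq_getElem_cons hj
    by_cases hc : ct[jn] = c
    · have hFN : pvFN ct jn c = jn + 1 := by
        unfold pvFN; rw [if_pos ⟨hj, by rw [List.getElem?_eq_getElem hj, hc]⟩]
      rw [hFN, hd]
      simp only [pvG, if_pos hc]
      omega
    · have hne : ¬ (jn < ct.length ∧ ct[jn]? = some c) := by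
        rintro ⟨_, h2⟩
        rw [List.getElem?_eq_getElem hj] at h2
        exact hc (by simpa using h2)
      have hFN : pvFN ct jn c = jn := by unfold pvFN; rw [if_neg hne]
      rw [hFN, hd]
      simp only [pvG, if_neg hc]
  · have hd : ct.drop jn = [] := List.drop_eq_nil_of_le (by omega)
    have hFN : pvFN ct jn c = jn := by
      unfold pvFN; rw [if_neg (by rintro ⟨h1, _⟩; omega)]
    rw [hFN, hd, pvG_nil, pvG_nil]

-- the per-cut values, expressed by the Nat greedy counts over an explicit range of cuts
lemma pvVals_eq (ct : List Char) : ∀ (cs : List Char) (jn : Nat),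
    pvVals ct cs (jn : Int) = (List.range (cs.length + 1)).map
      (fun c => max 0 ((ct.length : Int) - ((jn + pvG (ct.drop jn) (cs.take c) : Nat) : Int)
        - ((pvGB ct (cs.drop c) : Nat) : Int))) := by
  intro cs
  induction cs with
  | nil =>
    intro jn
    simp only [pvVals, List.length_nil, Nat.zero_add, List.range_succ, List.range_zero,
      List.nil_append, List.map_cons, List.map_nil, List.take_nil, List.drop_nil, pvGB]
    have h0 : pvG (ct.drop jn) ([] : List Char) = 0 := by simp [pvG]
    rw [h0]
    simp only [Nat.add_zero, Nat.cast_zero, List.cons.injEq, and_true]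
    omega
  | cons c cs ih =>
    intro jn
    rw [show pvVals ct (c :: cs) (jn : Int) =
      max 0 ((ct.length : Int) - (jn : Int) - pvBq ct (c :: cs)) ::
        pvVals ct cs (pvF ct (jn : Int) c) from rfl]
    rw [pvF_natCast, ih (pvFN ct jn c)]
    conv_rhs =>
      simp only [List.length_cons]
      rw [List.range_succ_eq_map, List.map_cons, List.map_map]
    congr 1
    · simp only [List.take_zero, List.drop_zero, pvG_nil', Nat.add_zero, pvBq_eq]
    · apply List.map_congr_left
      intro x _
      simp only [Function.comp_apply, List.take_succ_cons, List.drop_succ_cons]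
      rw [pvG_shift ct jn c (cs.take x)]

-- per-cut values at jn = 0
lemma pvVals_form (ct cs : List Char) :
    pvVals ct cs 0 = (List.range (cs.length + 1)).map
      (fun c => max 0 ((ct.length : Int) - ((pvG ct (cs.take c) : Nat) : Int)
        - ((pvGB ct (cs.drop c) : Nat) : Int))) := by
  have h := pvVals_eq ct cs 0
  simpa using h

-- ===== sublist toolbox =====

lemma pvDropSub {α : Type} (l : List α) {a b : Nat} (h : b ≤ a) :
    (l.drop a).Sublist (l.drop b) := by
  have h2 := List.drop_sublist (a - b) (l.drop b)
  rwa [List.drop_drop, Nat.add_sub_cancel' h] at h2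

lemma pvTakeSub {α : Type} (l : List α) {i p : Nat} (h : i ≤ p) :
    (l.take i).Sublist (l.take p) := by
  have h2 := List.take_sublist i (l.take p)
  rwa [List.take_take, min_eq_left h] at h2

lemma pvIsSub_eq (s : List Char) : ∀ u : List Char, pvIsSub u s = u.isSublist s := by
  induction s with
  | nil => intro u; cases u <;> simp [pvIsSub, List.isSublist]
  | cons x xs ih =>
    intro u
    cases u with
    | nil => simp [pvIsSub, List.isSublist]
    | cons c u' =>
      simp only [pvIsSub, List.isSublist]
      by_cases h : c = x
      · simp [h, ih]
      · rw [if_neg h, if_neg (by simpa using h), ih]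

lemma pvIsSub_iff (u s : List Char) : pvIsSub u s = true ↔ u.Sublist s := by
  rw [pvIsSub_eq, List.isSublist_iff_sublist]

-- ===== characterization of pvFeasible by A's value =====

lemma pvFeasTrue (ct cs : List Char) (j : Nat)
    (hj : pvLMin (pvVals ct cs 0) ≤ (j : Int)) : pvFeasible ct cs j = true := by
  have hmem : pvLMin (pvVals ct cs 0) ∈ (List.range (cs.length + 1)).map
      (fun c => max 0 ((ct.length : Int) - ((pvG ct (cs.take c) : Nat) : Int)
        - ((pvGB ct (cs.drop c) : Nat) : Int))) := by
    rw [← pvVals_form]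
    exact pvLMin_mem _ (pvVals_ne_nil ct cs 0)
  obtain ⟨c, _, hEc⟩ := List.mem_map.mp hmem
  set m := ct.length with hm
  set p := pvG ct (cs.take c) with hp
  set q := pvGB ct (cs.drop c) with hqdef
  have hcore : m ≤ p + q + j := by omega
  set i := min p (m - j) with hi
  unfold pvFeasible
  rw [List.any_eq_true]
  refine ⟨i, List.mem_range.mpr (by omega), ?_⟩
  rw [pvIsSub_iff]
  have h1 : (ct.take i).Sublist (cs.take c) :=
    (pvTakeSub ct (by omega)).trans (pvG_sound (cs.take c) ct)
  have h2 : (ct.drop (i + j)).Sublist (cs.drop c) := by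
    refine (pvDropSub ct (show m - q ≤ i + j by omega)).trans ?_
    exact pvGB_sound ct (cs.drop c)
  have := h1.append h2
  rwa [List.take_append_drop] at this

lemma pvFeasFalse (ct cs : List Char) (j : Nat)
    (hj : (j : Int) < pvLMin (pvVals ct cs 0)) : pvFeasible ct cs j = false := by
  rw [Bool.eq_false_iff]
  intro htrue
  unfold pvFeasible at htrue
  rw [List.any_eq_true] at htrue
  obtain ⟨i, hir, hsub⟩ := htrue
  rw [List.mem_range] at hir
  rw [pvIsSub_iff, List.append_sublist_iff] at hsub
  obtain ⟨s1, s2, hsplit, h1, h2⟩ := hsub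
  set m := ct.length with hm
  have hij : i + j ≤ m ∨ m ≤ j := by omega
  -- the cut at position |s1|
  have hclen : s1.length ≤ cs.length := by
    have := congrArg List.length hsplit; simp at this; omega
  have htake : cs.take s1.length = s1 := by rw [hsplit]; exact List.take_left
  have hdrop : cs.drop s1.length = s2 := by rw [hsplit]; exact List.drop_left
  set p := pvG ct s1 with hp
  set q := pvGB ct s2 with hq
  have hpi : i ≤ p := by
    apply pvG_max s1 ct i (by omega)
    exact h1
  have hqi : m - (i + j) ≤ q := by
    apply pvGB_max ct s2 (m - (i + j)) (by omega)
    have harith : m - (m - (i + j)) = min (i + j) m := by omega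
    rw [harith]
    rcases Nat.le_total (i + j) m with hle | hle
    · rw [min_eq_left hle]; exact h2
    · rw [min_eq_right hle, hm, List.drop_length]
      exact List.nil_sublist s2
  have hEmem : max 0 ((m : Int) - ((pvG ct (cs.take s1.length) : Nat) : Int)
      - ((pvGB ct (cs.drop s1.length) : Nat) : Int)) ∈ pvVals ct cs 0 := by
    rw [pvVals_form]
    exact List.mem_map.mpr ⟨s1.length, List.mem_range.mpr (by omega), rfl⟩
  rw [htake, hdrop] at hEmem
  have hle := pvLMin_le_mem _ _ hEmem
  omega

-- ===== binary search returns the least point of an upward-closed predicate =====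

lemma pvBSearch_eq (P : Nat → Bool) (N : Nat) (hP : ∀ j, P j = true ↔ N ≤ j) :
    ∀ (d lo hi : Nat), hi - lo ≤ d → lo ≤ N → N ≤ hi → pvBSearch P lo hi = N := by
  intro d
  induction d with
  | zero =>
    intro lo hi h1 h2 h3
    rw [pvBSearch, dif_neg (by omega)]
    omega
  | succ d ih =>
    intro lo hi h1 h2 h3
    by_cases hlt : lo < hi
    · rw [pvBSearch, dif_pos hlt]
      by_cases hN : N ≤ (lo + hi) / 2
      · rw [if_pos ((hP _).mpr hN)]
        exact ih lo ((lo + hi) / 2) (by omega) h2 hN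
      · rw [if_neg (by rw [hP]; omega)]
        exact ih ((lo + hi) / 2 + 1) hi (by omega) (by omega) h3
    · rw [pvBSearch, dif_neg hlt]
      omega

-- ===== VERDICT (by name: the statement is the Claim_ definition above) =====
theorem minimumScore_spec : Claim_equal_minimumScore := by
  intro s t _
  unfold Spec_minimumScore
  rw [pvA_eq]
  unfold minimumScore_alt
  simp only []
  set ct := t.toList with hct
  set cs := s.toList with hcs
  -- bounds on A's value
  have hmem : pvLMin (pvVals ct cs 0) ∈ (List.range (cs.length + 1)).map
      (fun c => max 0 ((ct.length : Int) - ((pvG ct (cs.take c) : Nat) : Int)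
        - ((pvGB ct (cs.drop c) : Nat) : Int))) := by
    rw [← pvVals_form]
    exact pvLMin_mem _ (pvVals_ne_nil ct cs 0)
  obtain ⟨c, _, hEc⟩ := List.mem_map.mp hmem
  have hV0 : 0 ≤ pvLMin (pvVals ct cs 0) := by omega
  have hVm : pvLMin (pvVals ct cs 0) ≤ (ct.length : Int) := by omega
  set N := (pvLMin (pvVals ct cs 0)).toNat with hN
  have hNV : (N : Int) = pvLMin (pvVals ct cs 0) := Int.toNat_of_nonneg hV0
  have hiff : ∀ j : Nat, pvFeasible ct cs j = true ↔ N ≤ j := by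
    intro j
    constructor
    · intro hfe
      by_contra hlt
      rw [pvFeasFalse ct cs j (by omega)] at hfe
      exact Bool.false_ne_true hfe
    · intro hle
      exact pvFeasTrue ct cs j (by omega)
  rw [pvBSearch_eq (pvFeasible ct cs) N hiff ct.length 0 ct.length (by omega) (by omega)
    (by omega)]
  omega
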